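-- pv_equiv track=rewrite | github.com/dharanireddy2709-b/AI_ASSIGNMENT-4 | Telangana_color.py | solve
-- ===== SOURCE A (Python) =====
-- districts = ["Hyderabad", "Rangareddy", "Medchal", "Karimnagar",
--              "Peddapalli", "Rajanna Sircilla", "Nalgonda",
--              "Suryapet", "Khammam", "Bhadradri"]
--
-- colors = ["Red", "Green", "Blue"]
--
-- neighbors = {
--     "Hyderabad": ["Rangareddy", "Medchal"],
--     "Rangareddy": ["Hyderabad", "Medchal"],
--     "Medchal": ["Hyderabad", "Rangareddy"],
--     "Karimnagar": ["Peddapalli", "Rajanna Sircilla"],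
--     "Peddapalli": ["Karimnagar"],
--     "Rajanna Sircilla": ["Karimnagar"],
--     "Nalgonda": ["Suryapet"],
--     "Suryapet": ["Nalgonda", "Khammam"],
--     "Khammam": ["Suryapet", "Bhadradri"],
--     "Bhadradri": ["Khammam"]
-- }
--
-- def check_valid(district, color, result):
--     for n in neighbors[district]:
--         if n in result and result[n] == color:
--             return False
--     return True
--
-- def solve(result):
--
--     # if all districts are colored
--     if len(result) == len(districts):
--         return True
--
--     # pick next unassigned district
--     for d in districts:
--         if d not in result:
--
--             for c in colors:
--                 if check_valid(d, c, result):
--                     result[d] = c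
--
--                     if solve(result):
--                         return True
--
--                     # backtrack
--                     result.pop(d)
--
--             return False
-- ===== SOURCE B (Python) =====
-- districts = ["Hyderabad", "Rangareddy", "Medchal", "Karimnagar",
--              "Peddapalli", "Rajanna Sircilla", "Nalgonda",
--              "Suryapet", "Khammam", "Bhadradri"]
--
-- colors = ["Red", "Green", "Blue"]
--
-- neighbors = {
--     "Hyderabad": ["Rangareddy", "Medchal"],
--     "Rangareddy": ["Hyderabad", "Medchal"],
--     "Medchal": ["Hyderabad", "Rangareddy"],
--     "Karimnagar": ["Peddapalli", "Rajanna Sircilla"],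
--     "Peddapalli": ["Karimnagar"],
--     "Rajanna Sircilla": ["Karimnagar"],
--     "Nalgonda": ["Suryapet"],
--     "Suryapet": ["Nalgonda", "Khammam"],
--     "Khammam": ["Suryapet", "Bhadradri"],
--     "Bhadradri": ["Khammam"]
-- }
--
-- def check_valid(district, color, result):
--     return all(result.get(n) != color for n in neighbors[district])
--
-- def solve(result):
--     # Every district has at most 2 neighbors and there are 3 colors, so a
--     # valid color always exists: one greedy left-to-right pass suffices and
--     # backtracking is never needed.
--     for d in districts:
--         if len(result) == len(districts):
--             return True
--         if d not in result:
--             for c in colors: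
--                 if check_valid(d, c, result):
--                     result[d] = c
--                     break
--     return len(result) == len(districts)
-- ===== Notes on version B (the rewrite author's own statement) =====
-- stated objective: simpler
-- what changed: Replaces the recursive backtracking search by a single greedy pass over the districts: since every district has at most 2 neighbors and there are 3 colors, a valid color always exists and backtracking never occurs, so one loop with no recursion, no popping and no re-scanning returns the same value.
import Mathlib
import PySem

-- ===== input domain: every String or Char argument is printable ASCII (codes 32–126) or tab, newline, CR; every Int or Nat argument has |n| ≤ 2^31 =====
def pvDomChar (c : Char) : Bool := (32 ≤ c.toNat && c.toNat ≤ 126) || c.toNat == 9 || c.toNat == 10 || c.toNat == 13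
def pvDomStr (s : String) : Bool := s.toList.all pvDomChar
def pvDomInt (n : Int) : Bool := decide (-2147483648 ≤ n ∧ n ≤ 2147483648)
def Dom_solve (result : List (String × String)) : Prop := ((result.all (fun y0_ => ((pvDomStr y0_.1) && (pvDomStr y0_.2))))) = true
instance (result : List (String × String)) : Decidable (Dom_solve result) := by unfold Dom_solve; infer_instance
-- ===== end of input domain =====

-- B replaces A's recursive backtracking 3-coloring search by one greedy pass over the districts
-- (a valid color always exists since every district has ≤ 2 neighbors and there are 3 colors).
-- Both Pythons mutate the argument dict; the equivalence proved here is about the RETURN value only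
-- (A restores `result` on a False return, B leaves its greedy assignments in place).


-- ===== PORT A =====
def districtsL : List String :=
  ["Hyderabad", "Rangareddy", "Medchal", "Karimnagar",
   "Peddapalli", "Rajanna Sircilla", "Nalgonda",
   "Suryapet", "Khammam", "Bhadradri"]

def colorsL : List String := ["Red", "Green", "Blue"]

def neighborsD : PySem.Dict String (List String) := PySem.Dict.mk
  [("Hyderabad", ["Rangareddy", "Medchal"]),
   ("Rangareddy", ["Hyderabad", "Medchal"]),
   ("Medchal", ["Hyderabad", "Rangareddy"]),
   ("Karimnagar", ["Peddapalli", "Rajanna Sircilla"]),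
   ("Peddapalli", ["Karimnagar"]),
   ("Rajanna Sircilla", ["Karimnagar"]),
   ("Nalgonda", ["Suryapet"]),
   ("Suryapet", ["Nalgonda", "Khammam"]),
   ("Khammam", ["Suryapet", "Bhadradri"]),
   ("Bhadradri", ["Khammam"])]

-- the `for n in neighbors[district]` loop of A's check_valid ('n in result and result[n] == color')
def cvLoop (result : PySem.Dict String String) (color : String) : List String → Bool
  | [] => true
  | n :: rest =>
      if PySem.Dict.get? result n == some color then false else cvLoop result color rest

-- A's check_valid; neighbors[district]: every call site has district ∈ districts, all present in
-- neighborsD, so getD _ [] is exact (Python's KeyError is unreachable).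
def check_valid (district color : String) (result : PySem.Dict String String) : Bool :=
  cvLoop result color (PySem.Dict.getD neighborsD district [])

-- A's recursion, with a fuel guard for totality only: each nested call colors one more district,
-- so the depth is at most 11 and fuel 16 is never exhausted (proved in solveFuel_eq below).
def solveFuel : Nat → PySem.Dict String String → Bool
  | 0, _ => false
  | fuel + 1, result =>
      if PySem.Dict.size result = districtsL.length then true
      else
        match districtsL.find? (fun d => !(PySem.Dict.contains result d)) with
        | some d =>
            -- 'for c in colors: if check_valid: result[d]=c; if solve(result): return True; result.pop(d)'
            colorsL.any (fun c => check_valid d c result && solveFuel fuel (PySem.Dict.insert result d c))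
        | none => false  -- Python falls off the function (returns None); excluded by Pre_solve

def solve (result : List (String × String)) : Bool :=
  solveFuel 16 (PySem.Dict.mk result)

-- ===== PORT B =====
-- B's check_valid: all(result.get(n) != color for n in neighbors[district])
def check_valid_alt (district color : String) (result : PySem.Dict String String) : Bool :=
  (PySem.Dict.getD neighborsD district []).all (fun n => !(PySem.Dict.get? result n == some color))

-- B's single greedy 'for d in districts' loop
def solveGo (result : PySem.Dict String String) : List String → Bool
  | [] => PySem.Dict.size result = districtsL.length
  | d :: rest =>
      if PySem.Dict.size result = districtsL.length then true
      else if !(PySem.Dict.contains result d) then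
        match colorsL.find? (fun c => check_valid_alt d c result) with
        | some c => solveGo (PySem.Dict.insert result d c) rest
        | none => solveGo result rest
      else solveGo result rest

def solve_alt (result : List (String × String)) : Bool :=
  solveGo (PySem.Dict.mk result) districtsL

-- ===== PRECONDITION & SPEC =====
-- Pre_ excludes (a) association lists with duplicate keys — a Python dict cannot hold them, so such
-- lists encode no Python input — and (b) inputs whose keys include all ten districts plus extra keys,
-- on which Python A falls off the function and returns None, not a bool.
def Pre_solve (result : List (String × String)) : Prop :=
  (result.map Prod.fst).Nodup ∧
  ((∀ x ∈ districtsL, x ∈ result.map Prod.fst) → result.length = 10)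
instance (result : List (String × String)) : Decidable (Pre_solve result) := by
  unfold Pre_solve; infer_instance

def pvWitness_solve : (List (String × String)) := [("Hyderabad", "Red"), ("X", "Purple")]

def Spec_solve (result : List (String × String)) (out : Bool) : Prop := out = solve_alt result
instance (result : List (String × String)) (out : Bool) : Decidable (Spec_solve result out) := by
  unfold Spec_solve; infer_instance

-- ===== CLAIM (what is proved, stated in full; the proofs are below) =====
def Claim_equal_solve : Prop :=
  ∀ (result : List (String × String)), Dom_solve result → Pre_solve result →
    Spec_solve result (solve result)

-- ===== LEMMAS AND PROOFS =====

-- number of districts not yet colored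
def unassigned (result : PySem.Dict String String) : Nat :=
  (districtsL.filter (fun x => !(PySem.Dict.contains result x))).length

theorem cvLoop_eq_all (r : PySem.Dict String String) (c : String) (ns : List String) :
    cvLoop r c ns = ns.all (fun n => !(PySem.Dict.get? r n == some c)) := by
  induction ns with
  | nil => rfl
  | cons n rest ih =>
      simp only [cvLoop, List.all_cons, ih]
      by_cases h : PySem.Dict.get? r n == some c <;> simp [h]

theorem check_valid_eq (d c : String) (r : PySem.Dict String String) :
    check_valid d c r = check_valid_alt d c r := by
  simp [check_valid, check_valid_alt, cvLoop_eq_all]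

theorem neighbors_len_le (d : String) :
    (PySem.Dict.getD neighborsD d []).length ≤ 2 := by
  simp only [neighborsD, PySem.Dict.getD_eq_get?_getD, PySem.Dict.get?_mk_cons]
  split_ifs <;> simp [PySem.Dict.get?]

-- two option values can block at most two of the three colors
theorem exists_color_pair (o1 o2 : Option String) :
    ∃ c ∈ colorsL, o1 ≠ some c ∧ o2 ≠ some c := by
  by_cases hR : o1 = some "Red" ∨ o2 = some "Red"
  · by_cases hG : o1 = some "Green" ∨ o2 = some "Green"
    · refine ⟨"Blue", by simp [colorsL], ?_, ?_⟩ <;>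
        rcases hR with h | h <;> rcases hG with g | g <;> simp_all
    · rw [not_or] at hG
      exact ⟨"Green", by simp [colorsL], hG.1, hG.2⟩
  · rw [not_or] at hR
    exact ⟨"Red", by simp [colorsL], hR.1, hR.2⟩

-- a valid color always exists: at most 2 neighbors block at most 2 of the 3 colors
theorem exists_valid_color (d : String) (r : PySem.Dict String String) :
    ∃ c ∈ colorsL, check_valid_alt d c r = true := by
  have hlen := neighbors_len_le d
  unfold check_valid_alt
  rcases hns : PySem.Dict.getD neighborsD d [] with _ | ⟨n1, _ | ⟨n2, rest⟩⟩
  · exact ⟨"Red", by simp [colorsL], by simp⟩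
  · obtain ⟨c, hc, h1, _⟩ := exists_color_pair (PySem.Dict.get? r n1) none
    exact ⟨c, hc, by simp [h1]⟩
  · rw [hns] at hlen
    have : rest = [] := by
      cases rest with
      | nil => rfl
      | cons _ _ => simp at hlen
    subst this
    obtain ⟨c, hc, h1, h2⟩ := exists_color_pair (PySem.Dict.get? r n1) (PySem.Dict.get? r n2)
    exact ⟨c, hc, by simp [h1, h2]⟩

theorem districts_nodup : districtsL.Nodup := by decide

theorem size_le_of_all_contains (r : PySem.Dict String String)
    (h : ∀ x ∈ districtsL, PySem.Dict.contains r x = true) :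
    10 ≤ PySem.Dict.size r := by
  have hsub : districtsL ⊆ r.keys := by
    intro x hx
    exact (PySem.Dict.contains_iff_mem_keys r x).mp (h x hx)
  have := (districts_nodup.subperm hsub).length_le
  simpa [PySem.Dict.size, PySem.Dict.keys] using this

-- assigned districts are distinct keys, so size + unassigned ≥ 10
theorem size_add_unassigned (r : PySem.Dict String String) :
    10 ≤ PySem.Dict.size r + unassigned r := by
  have hsub : districtsL.filter (fun x => PySem.Dict.contains r x) ⊆ r.keys := by
    intro x hx
    rw [List.mem_filter] at hx
    exact (PySem.Dict.contains_iff_mem_keys r x).mp hx.2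
  have h1 : (districtsL.filter (fun x => PySem.Dict.contains r x)).length ≤ PySem.Dict.size r := by
    have := ((districts_nodup.filter _).subperm hsub).length_le
    simpa [PySem.Dict.size, PySem.Dict.keys] using this
  have h2 : districtsL.length = (districtsL.filter (fun x => PySem.Dict.contains r x)).length
      + unassigned r := by
    simpa [unassigned] using
      List.length_eq_length_filter_add (fun x => PySem.Dict.contains r x) (l := districtsL)
  have h3 : districtsL.length = 10 := by decide
  omega

theorem filter_insert_of_not_mem (r : PySem.Dict String String) (d c : String)
    (l : List String) (hd : d ∉ l) :
    l.filter (fun x => !(PySem.Dict.contains (PySem.Dict.insert r d c) x))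
      = l.filter (fun x => !(PySem.Dict.contains r x)) := by
  apply List.filter_congr
  intro x hx
  have hne : x ≠ d := fun h => hd (h ▸ hx)
  simp [PySem.Dict.contains_insert, hne]

theorem filter_len_insert (r : PySem.Dict String String) (d c : String) :
    ∀ l : List String, l.Nodup → d ∈ l → PySem.Dict.contains r d = false →
      (l.filter (fun x => !(PySem.Dict.contains (PySem.Dict.insert r d c) x))).length + 1
        = (l.filter (fun x => !(PySem.Dict.contains r x))).length := by
  intro l
  induction l with
  | nil => simp
  | cons a rest ih =>
      intro hnd hmem hnc
      rw [List.nodup_cons] at hnd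
      rcases List.mem_cons.mp hmem with rfl | hmem'
      · rw [List.filter_cons, List.filter_cons,
          filter_insert_of_not_mem r d c rest hnd.1]
        simp [PySem.Dict.contains_insert_self, hnc]
      · have hne : a ≠ d := fun h => hnd.1 (h ▸ hmem')
        have hsame : PySem.Dict.contains (PySem.Dict.insert r d c) a
            = PySem.Dict.contains r a := by
          simp [PySem.Dict.contains_insert, hne]
        cases hca : PySem.Dict.contains r a <;>
          simp [hsame, hca, ih hnd.2 hmem' hnc]

theorem unassigned_insert (r : PySem.Dict String String) (d c : String)
    (hmem : d ∈ districtsL) (hnc : PySem.Dict.contains r d = false) :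
    unassigned (PySem.Dict.insert r d c) + 1 = unassigned r :=
  filter_len_insert r d c districtsL districts_nodup hmem hnc

theorem size_insert_fresh (r : PySem.Dict String String) (d c : String)
    (hnc : PySem.Dict.contains r d = false) :
    PySem.Dict.size (PySem.Dict.insert r d c) = PySem.Dict.size r + 1 := by
  simp [PySem.Dict.size_insert, hnc]

-- A's recursion always returns decide (size ≤ 10) when it has enough fuel
theorem solveFuel_eq (fuel : Nat) (r : PySem.Dict String String)
    (hf : unassigned r < fuel) :
    solveFuel fuel r = decide (PySem.Dict.size r ≤ 10) := by
  induction fuel generalizing r with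
  | zero => omega
  | succ f ih =>
      rw [solveFuel]
      have h10 : districtsL.length = 10 := by decide
      by_cases hs : PySem.Dict.size r = districtsL.length
      · simp [hs, h10]
      · simp only [if_neg hs]
        rcases hfind : districtsL.find? (fun d => !(PySem.Dict.contains r d)) with _ | d
        · -- every district is colored, so size ≥ 10 and (size ≠ 10) size > 10
          have hall : ∀ x ∈ districtsL, PySem.Dict.contains r x = true := by
            intro x hx
            have := List.find?_eq_none.mp hfind x hx
            simpa using this
          have := size_le_of_all_contains r hall
          have : ¬ (PySem.Dict.size r ≤ 10) := by omega
          simp [this]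
        · have hmem : d ∈ districtsL := List.mem_of_find?_eq_some hfind
          have hnc : PySem.Dict.contains r d = false := by
            have := List.find?_some hfind
            simpa using this
          have hu : d ∈ districtsL.filter (fun x => !(PySem.Dict.contains r x)) := by
            rw [List.mem_filter]; simp [hmem, hnc]
          have hupos : 0 < unassigned r := by
            unfold unassigned
            exact List.length_pos_of_mem hu
          have hrec : ∀ c, solveFuel f (PySem.Dict.insert r d c)
              = decide (PySem.Dict.size r + 1 ≤ 10) := by
            intro c
            rw [ih _ (by have := unassigned_insert r d c hmem hnc; omega),
              size_insert_fresh r d c hnc]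
          by_cases hle : PySem.Dict.size r ≤ 10
          · -- size < 10: the first valid color's recursive call succeeds
            have hlt : PySem.Dict.size r + 1 ≤ 10 := by
              rw [h10] at hs; omega
            obtain ⟨c, hcmem, hcv⟩ := exists_valid_color d r
            have : colorsL.any
                (fun c => check_valid d c r && solveFuel f (PySem.Dict.insert r d c)) = true := by
              rw [List.any_eq_true]
              exact ⟨c, hcmem, by rw [check_valid_eq, hcv, hrec c]; simp [hlt]⟩
            simp [this, hle]
          · -- size > 10: every recursive call fails
            have : colorsL.any
                (fun c => check_valid d c r && solveFuel f (PySem.Dict.insert r d c)) = false := by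
              rw [List.any_eq_false]
              intro c _
              rw [check_valid_eq, hrec c]
              simp; intro _; omega
            simp [this, hle]

-- B's greedy pass over a duplicate-free district suffix
theorem solveGo_eq (ds : List String) (r : PySem.Dict String String) (hnd : ds.Nodup) :
    solveGo r ds = decide (PySem.Dict.size r ≤ 10 ∧
      10 ≤ PySem.Dict.size r + (ds.filter (fun x => !(PySem.Dict.contains r x))).length) := by
  induction ds generalizing r with
  | nil =>
      rw [solveGo]
      have h10 : districtsL.length = 10 := by decide
      rw [h10]
      simp only [List.filter_nil, List.length_nil, Nat.add_zero, decide_eq_decide]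
      omega
  | cons d rest ih =>
      rw [List.nodup_cons] at hnd
      have h10 : districtsL.length = 10 := by decide
      rw [solveGo, h10]
      by_cases hs : PySem.Dict.size r = 10
      · rw [if_pos hs, eq_comm, decide_eq_true_iff]
        omega
      · rw [if_neg hs]
        cases hc : PySem.Dict.contains r d with
        | true =>
            simp only [Bool.not_true, Bool.false_eq_true, if_false]
            rw [ih r hnd.2]
            simp [hc]
        | false =>
            simp only [Bool.not_false, if_true]
            obtain ⟨c0, hc0mem, hc0⟩ := exists_valid_color d r
            have hfind : (colorsL.find? (fun c => check_valid_alt d c r)).isSome := by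
              rw [List.find?_isSome]
              exact ⟨c0, hc0mem, hc0⟩
            rcases hfv : colorsL.find? (fun c => check_valid_alt d c r) with _ | c
            · rw [hfv] at hfind; simp at hfind
            · show solveGo (PySem.Dict.insert r d c) rest = _
              rw [ih (PySem.Dict.insert r d c) hnd.2,
                size_insert_fresh r d c hc,
                filter_insert_of_not_mem r d c rest hnd.1]
              simp only [List.filter_cons, hc, Bool.not_false, if_true, List.length_cons,
                decide_eq_decide]
              omega

-- ===== VERDICT (by name: the statement is the Claim_ definition above) =====
theorem solve_spec : Claim_equal_solve := by
  intro result _ _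
  unfold Spec_solve solve solve_alt
  rw [solveFuel_eq 16 _ (by
    have : unassigned (PySem.Dict.mk result) ≤ districtsL.length := List.length_filter_le _ _
    have h10 : districtsL.length = 10 := by decide
    omega)]
  rw [solveGo_eq districtsL _ districts_nodup]
  have := size_add_unassigned (PySem.Dict.mk result)
  unfold unassigned at this
  simp only [decide_eq_decide]
  omega
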